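-- pv_equiv track=rewrite | github.com/piotrpalek/aenea-grammar-simple | Words.py | format_camel_case
-- ===== SOURCE A (Python) =====
-- def strip_dragon_info(text):
--     newWords = []
--     words = str(text).split(" ")
--     for word in words:
--         if word.startswith("\\backslash"):
--             word = "\\"  # Backslash requires special handling.
--         elif word.find("\\") > -1:
--             word = word[:word.find("\\")]  # Remove spoken form info.
--         newWords.append(word)
--     return newWords
--
-- def format_camel_case(text):
--     newText = ""
--     words = strip_dragon_info(text)
--     for word in words:
--         if newText == '':
--             newText = word[:1].lower() + word[1:]
--         else:
--             newText = '%s%s' % (newText, word.capitalize())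
--     return newText
-- ===== SOURCE B (Python) =====
-- def strip_dragon_info(text):
--     newWords = []
--     words = str(text).split(" ")
--     for word in words:
--         if word.startswith("\\backslash"):
--             word = "\\"  # Backslash requires special handling.
--         elif word.find("\\") > -1:
--             word = word[:word.find("\\")]  # Remove spoken form info.
--         newWords.append(word)
--     return newWords
--
-- def format_camel_case(text):
--     words = [w for w in strip_dragon_info(text) if w != '']
--     if not words:
--         return ''
--     head = words[0]
--     return head[:1].lower() + head[1:] + ''.join(w.capitalize() for w in words[1:])
-- ===== Notes on version B (the rewrite author's own statement) =====
-- stated objective: simpler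
-- what changed: Replaces A's single stateful accumulation loop (with an is-the-accumulator-still-empty branch on every word) by a filter of the empty stripped words, a separate head whose first character is lowercased, and a join of the capitalized tail.
import Mathlib
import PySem

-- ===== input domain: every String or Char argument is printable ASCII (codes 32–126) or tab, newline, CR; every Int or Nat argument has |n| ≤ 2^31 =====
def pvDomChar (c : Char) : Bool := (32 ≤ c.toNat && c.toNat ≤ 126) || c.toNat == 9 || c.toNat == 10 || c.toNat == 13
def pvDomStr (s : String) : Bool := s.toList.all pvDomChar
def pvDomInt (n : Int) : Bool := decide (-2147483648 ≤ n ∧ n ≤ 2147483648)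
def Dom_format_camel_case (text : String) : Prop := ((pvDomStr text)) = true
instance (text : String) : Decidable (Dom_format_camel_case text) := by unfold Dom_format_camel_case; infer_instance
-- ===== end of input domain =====

-- B replaces A's single stateful accumulation loop by a filter of the empty stripped
-- words, a head treated separately, and a join of the capitalized tail (objective: simpler).

-- ===== PORT A =====
-- str.capitalize(): first char uppercased, rest lowercased — exact on the ASCII domain
-- (Python title-cases the first char, which coincides with uppercasing on ASCII).
def pyCapitalize (s : String) : String :=
  String.ofList
    (match s.toList with
     | [] => []
     | c :: rest => PySem.Chars.upperChar c :: rest.map PySem.Chars.lowerChar)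

-- loop body of strip_dragon_info: the per-word rewriting
def stripWord (word : String) : String :=
  if PySem.Str.startswith word "\\backslash" then "\\"
  else if PySem.Str.find word "\\" > -1 then
    PySem.Str.slice word none (some (PySem.Str.find word "\\"))
  else word

-- split(" ") with a non-empty literal separator never yields none; .getD [] only discharges the option
def strip_dragon_info (text : String) : List String :=
  ((PySem.Str.split? text " ").getD []).foldl (fun newWords word => newWords ++ [stripWord word]) []

def format_camel_case (text : String) : String :=
  (strip_dragon_info text).foldl
    (fun newText word =>
      if newText = "" then
        PySem.Str.lower (PySem.Str.slice word none (some 1)) ++ PySem.Str.slice word (some 1) none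
      else newText ++ pyCapitalize word) ""

-- ===== PORT B =====
def format_camel_case_alt (text : String) : String :=
  match (strip_dragon_info text).filter (fun w => w ≠ "") with
  | [] => ""
  | head :: rest =>
      PySem.Str.lower (PySem.Str.slice head none (some 1)) ++ PySem.Str.slice head (some 1) none
        ++ PySem.Str.join "" (rest.map pyCapitalize)

-- ===== PRECONDITION & SPEC =====
def Spec_format_camel_case (text : String) (out : String) : Prop := out = format_camel_case_alt text
instance (text : String) (out : String) : Decidable (Spec_format_camel_case text out) := by unfold Spec_format_camel_case; infer_instance

-- ===== CLAIM (what is proved, stated in full; the proofs are below) =====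
def Claim_equal_format_camel_case : Prop := ∀ (text : String), Dom_format_camel_case text → Spec_format_camel_case text (format_camel_case text)

-- ===== LEMMAS AND PROOFS =====

theorem pyCapitalize_empty : pyCapitalize "" = "" := rfl

theorem append_ne_empty (a b : String) (h : a ≠ "") : a ++ b ≠ "" := by
  intro hc
  apply h
  rw [← String.toList_inj] at hc ⊢
  simp only [String.toList_append] at hc
  simpa using List.append_eq_nil_iff.mp hc |>.1

-- the head expression of both programs: word[:1].lower() + word[1:]
theorem lowerFirst_ne_empty (w : String) (h : w ≠ "") :
    PySem.Str.lower (PySem.Str.slice w none (some 1)) ++ PySem.Str.slice w (some 1) none ≠ "" := by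
  intro hc
  rw [← String.toList_inj] at hc
  simp only [String.toList_append, PySem.Str.toList_lower, PySem.Str.toList_slice,
    PySem.Chars.slice_eq_listSlice] at hc
  have h1 : PySem.List.slice w.toList none (some 1) = w.toList.take 1 := by
    have := PySem.List.slice_to_natCast w.toList 1
    simpa using this
  rw [h1] at hc
  rcases List.append_eq_nil_iff.mp hc with ⟨hl, _⟩
  cases hw : w.toList with
  | nil => exact h (String.toList_eq_nil_iff.mp hw)
  | cons c r => rw [hw] at hl; simp [PySem.Chars.lower] at hl

theorem join_empty_cons (w : String) (l : List String) :
    PySem.Str.join "" (w :: l) = w ++ PySem.Str.join "" l := by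
  rw [← String.toList_inj]
  simp only [String.toList_append, PySem.Str.toList_join]
  cases l with
  | nil => simp [PySem.Chars.join_singleton, PySem.Chars.join_nil]
  | cons x xs => simp [PySem.Chars.join_cons_cons]

theorem join_empty_nil : PySem.Str.join "" ([] : List String) = "" := by
  rw [← String.toList_inj]
  simp [PySem.Str.toList_join, PySem.Chars.join_nil]

-- A's loop from a non-empty accumulator appends the capitalized non-empty words
theorem loopA_ne (ws : List String) (acc : String) (hacc : acc ≠ "") :
    ws.foldl
      (fun newText word =>
        if newText = "" then
          PySem.Str.lower (PySem.Str.slice word none (some 1)) ++ PySem.Str.slice word (some 1) none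
        else newText ++ pyCapitalize word) acc
      = acc ++ PySem.Str.join "" ((ws.filter (fun w => w ≠ "")).map pyCapitalize) := by
  induction ws generalizing acc with
  | nil => simp [join_empty_nil]
  | cons w ws ih =>
      simp only [List.foldl_cons, if_neg hacc]
      by_cases hw : w = ""
      · subst hw
        rw [show acc ++ pyCapitalize "" = acc from by simp [pyCapitalize_empty]]
        rw [ih acc hacc]
        simp
      · rw [ih _ (append_ne_empty acc _ hacc)]
        have hw' : decide (w ≠ "") = true := by simpa using hw
        simp only [List.filter_cons, hw', if_true]
        simp only [List.map_cons, join_empty_cons]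
        rw [String.append_assoc]

theorem emptyHead :
    PySem.Str.lower (PySem.Str.slice "" none (some 1)) ++ PySem.Str.slice "" (some 1) none = "" := by
  decide

-- A's loop from the empty accumulator computes B's head/tail formula
theorem loopA_empty (ws : List String) :
    ws.foldl
      (fun newText word =>
        if newText = "" then
          PySem.Str.lower (PySem.Str.slice word none (some 1)) ++ PySem.Str.slice word (some 1) none
        else newText ++ pyCapitalize word) ""
      = match ws.filter (fun w => w ≠ "") with
        | [] => ""
        | head :: rest =>
            PySem.Str.lower (PySem.Str.slice head none (some 1)) ++ PySem.Str.slice head (some 1) none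
              ++ PySem.Str.join "" (rest.map pyCapitalize) := by
  induction ws with
  | nil => simp
  | cons w ws ih =>
      by_cases hw : w = ""
      · subst hw
        simp only [List.foldl_cons, if_true, emptyHead]
        simpa using ih
      · simp only [List.foldl_cons, if_true]
        have hlf := lowerFirst_ne_empty w hw
        rw [loopA_ne ws _ hlf]
        have hw' : decide (w ≠ "") = true := by simpa using hw
        simp only [List.filter_cons, hw', if_true]

-- ===== VERDICT (by name: the statement is the Claim_ definition above) =====
theorem format_camel_case_spec : Claim_equal_format_camel_case := by
  intro text _
  unfold Spec_format_camel_case format_camel_case format_camel_case_alt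
  exact loopA_empty (strip_dragon_info text)
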